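-- pv_equiv track=rewrite | github.com/pratapsurya601-ai/yieldiq | backend/services/newsletter_render_service.py | _restyle_mistune_html
-- ===== SOURCE A (Python) =====
-- def _restyle_mistune_html(html: str) -> str:
--     """Inject inline styles into mistune output so email clients
--     that strip <style> blocks still render the typography correctly.
--     """
--     replacements = {
--         "<h2>": (
--             '<h2 style="margin:24px 0 10px;font-family:Georgia,'
--             "'Times New Roman',serif;font-size:19px;font-weight:700;"
--             'color:#0F172A;letter-spacing:-0.2px;">'
--         ),
--         "<h3>": (
--             '<h3 style="margin:18px 0 8px;font-family:Georgia,'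
--             "'Times New Roman',serif;font-size:16px;font-weight:700;"
--             'color:#0F172A;">'
--         ),
--         "<p>": (
--             '<p style="margin:0 0 14px;font-size:16px;line-height:1.7;'
--             'color:#1E293B;">'
--         ),
--         "<ul>": (
--             '<ul style="margin:0 0 16px;padding:0 0 0 20px;'
--             'font-size:16px;line-height:1.7;color:#1E293B;">'
--         ),
--         "<li>": '<li style="margin:0 0 6px;">',
--         "<strong>": '<strong style="color:#0F172A;font-weight:700;">',
--         "<em>": '<em style="color:#475569;">',
--         "<a href=": '<a style="color:#0F172A;text-decoration:underline;" href=',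
--     }
--     for k, v in replacements.items():
--         html = html.replace(k, v)
--     return html
-- ===== SOURCE B (Python) =====
-- import re
--
-- _REPLACEMENTS = {
--     "<h2>": (
--         '<h2 style="margin:24px 0 10px;font-family:Georgia,'
--         "'Times New Roman',serif;font-size:19px;font-weight:700;"
--         'color:#0F172A;letter-spacing:-0.2px;">'
--     ),
--     "<h3>": (
--         '<h3 style="margin:18px 0 8px;font-family:Georgia,'
--         "'Times New Roman',serif;font-size:16px;font-weight:700;"
--         'color:#0F172A;">'
--     ),
--     "<p>": (
--         '<p style="margin:0 0 14px;font-size:16px;line-height:1.7;'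
--         'color:#1E293B;">'
--     ),
--     "<ul>": (
--         '<ul style="margin:0 0 16px;padding:0 0 0 20px;'
--         'font-size:16px;line-height:1.7;color:#1E293B;">'
--     ),
--     "<li>": '<li style="margin:0 0 6px;">',
--     "<strong>": '<strong style="color:#0F172A;font-weight:700;">',
--     "<em>": '<em style="color:#475569;">',
--     "<a href=": '<a style="color:#0F172A;text-decoration:underline;" href=',
-- }
--
-- # One regex alternation over all keys (insertion order preserved), one left-to-right pass.
-- _PATTERN = re.compile("|".join(re.escape(k) for k in _REPLACEMENTS))
--
--
-- def _restyle_mistune_html(html: str) -> str: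
--     """Inject inline styles into mistune output so email clients
--     that strip <style> blocks still render the typography correctly.
--     """
--     return _PATTERN.sub(lambda m: _REPLACEMENTS[m.group(0)], html)
-- ===== Notes on version B (the rewrite author's own statement) =====
-- stated objective: idiomatic
-- what changed: Replaces A's eight sequential str.replace passes over the string by one precompiled regex alternation of the (escaped, insertion-ordered) keys applied in a single re.sub pass with a table lookup per match.
import Mathlib
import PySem

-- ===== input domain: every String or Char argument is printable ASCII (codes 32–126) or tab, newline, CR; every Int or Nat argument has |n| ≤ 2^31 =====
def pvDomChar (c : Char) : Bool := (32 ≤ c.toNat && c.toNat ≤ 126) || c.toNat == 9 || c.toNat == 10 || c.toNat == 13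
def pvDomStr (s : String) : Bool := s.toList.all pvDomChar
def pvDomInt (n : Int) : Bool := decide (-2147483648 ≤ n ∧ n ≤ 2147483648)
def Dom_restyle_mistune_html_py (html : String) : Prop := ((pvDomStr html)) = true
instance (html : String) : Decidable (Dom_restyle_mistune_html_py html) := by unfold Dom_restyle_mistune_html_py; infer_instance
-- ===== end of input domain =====

-- B replaces A's eight sequential str.replace passes by one left-to-right scan with a
-- table lookup (in Python: one compiled regex alternation of the keys, one re.sub call);
-- objective: idiomatic single pass, same result.

-- ===== PORT A =====
-- the `replacements` dict of A, in insertion order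
def pvPairsA : List (String × String) := [
  ("<h2>", "<h2 style=\"margin:24px 0 10px;font-family:Georgia,'Times New Roman',serif;font-size:19px;font-weight:700;color:#0F172A;letter-spacing:-0.2px;\">"),
  ("<h3>", "<h3 style=\"margin:18px 0 8px;font-family:Georgia,'Times New Roman',serif;font-size:16px;font-weight:700;color:#0F172A;\">"),
  ("<p>", "<p style=\"margin:0 0 14px;font-size:16px;line-height:1.7;color:#1E293B;\">"),
  ("<ul>", "<ul style=\"margin:0 0 16px;padding:0 0 0 20px;font-size:16px;line-height:1.7;color:#1E293B;\">"),
  ("<li>", "<li style=\"margin:0 0 6px;\">"),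
  ("<strong>", "<strong style=\"color:#0F172A;font-weight:700;\">"),
  ("<em>", "<em style=\"color:#475569;\">"),
  ("<a href=", "<a style=\"color:#0F172A;text-decoration:underline;\" href=")
]

-- A: `for k, v in replacements.items(): html = html.replace(k, v)`
def restyle_mistune_html_py (html : String) : String :=
  pvPairsA.foldl (fun h kv => PySem.Str.replace h kv.1 kv.2) html

-- ===== PORT B =====
-- B's `_REPLACEMENTS` dict (same literals, built independently for B)
def pvTableB : List (List Char × List Char) := [
  ("<h2>".toList, "<h2 style=\"margin:24px 0 10px;font-family:Georgia,'Times New Roman',serif;font-size:19px;font-weight:700;color:#0F172A;letter-spacing:-0.2px;\">".toList),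
  ("<h3>".toList, "<h3 style=\"margin:18px 0 8px;font-family:Georgia,'Times New Roman',serif;font-size:16px;font-weight:700;color:#0F172A;\">".toList),
  ("<p>".toList, "<p style=\"margin:0 0 14px;font-size:16px;line-height:1.7;color:#1E293B;\">".toList),
  ("<ul>".toList, "<ul style=\"margin:0 0 16px;padding:0 0 0 20px;font-size:16px;line-height:1.7;color:#1E293B;\">".toList),
  ("<li>".toList, "<li style=\"margin:0 0 6px;\">".toList),
  ("<strong>".toList, "<strong style=\"color:#0F172A;font-weight:700;\">".toList),
  ("<em>".toList, "<em style=\"color:#475569;\">".toList),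
  ("<a href=".toList, "<a style=\"color:#0F172A;text-decoration:underline;\" href=".toList)
]

-- hand port of `_PATTERN.sub(lambda m: _REPLACEMENTS[m.group(0)], html)`: a regex
-- alternation of escaped literals scans left to right and, at each position, takes the
-- first alternative that matches there (exact for literal alternatives); on a match it
-- emits the replacement and resumes after the matched text, else copies the character.
def pvScanB (s : List Char) : List Char :=
  match s with
  | [] => []
  | c :: t =>
    match pvTableB.find? (fun kv => kv.1.isPrefixOf (c :: t)) with
    | some (k, v) => v ++ pvScanB (t.drop (k.length - 1))
    | none => c :: pvScanB t
termination_by s.length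
decreasing_by
  all_goals simp [List.length_drop]

def restyle_mistune_html_py_alt (html : String) : String :=
  String.ofList (pvScanB html.toList)

-- ===== PRECONDITION & SPEC =====
def Spec_restyle_mistune_html_py (html : String) (out : String) : Prop := out = restyle_mistune_html_py_alt html
instance (html : String) (out : String) : Decidable (Spec_restyle_mistune_html_py html out) := by unfold Spec_restyle_mistune_html_py; infer_instance

-- ===== CLAIM (what is proved, stated in full; the proofs are below) =====
def Claim_equal_restyle_mistune_html_py : Prop := ∀ (html : String), Dom_restyle_mistune_html_py html → Spec_restyle_mistune_html_py html (restyle_mistune_html_py html)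

-- ===== LEMMAS AND PROOFS =====

-- single-key scan: the fuel-free shape of PySem.Chars.replace for a nonempty needle
def pvScan1 (k v : List Char) (s : List Char) : List Char :=
  match s with
  | [] => []
  | c :: t =>
    if k.isPrefixOf (c :: t) then v ++ pvScan1 k v (t.drop (k.length - 1))
    else c :: pvScan1 k v t
termination_by s.length
decreasing_by
  all_goals simp [List.length_drop]

-- A's chain of replaces, on char lists
def pvChain (tbl : List (List Char × List Char)) (s : List Char) : List Char :=
  tbl.foldl (fun h kv => pvScan1 kv.1 kv.2 h) s

-- shape of the table that makes one pass equal eight passes: every key and value starts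
-- with '<' and contains no further '<'; keys are pairwise prefix-incomparable; no key is
-- prefix-comparable with any value
def pvGood (tbl : List (List Char × List Char)) : Prop :=
  (∀ kv ∈ tbl, kv.1.head? = some '<' ∧ '<' ∉ kv.1.tail ∧ kv.2.head? = some '<' ∧ '<' ∉ kv.2.tail) ∧
  tbl.Pairwise (fun a b => ¬ a.1 <+: b.1 ∧ ¬ b.1 <+: a.1) ∧
  (∀ a ∈ tbl, ∀ b ∈ tbl, ¬ a.1 <+: b.2 ∧ ¬ b.2 <+: a.1)

set_option maxRecDepth 40000 in
theorem pvGood_tableB : pvGood pvTableB := by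
  refine ⟨by decide, by decide, by decide⟩

theorem pvShapeCons {l : List Char} (h1 : l.head? = some '<') : l = '<' :: l.tail := by
  cases l <;> simp_all

theorem pvScan1_nil (k v : List Char) : pvScan1 k v [] = [] := by
  simp [pvScan1]

theorem pvScan1_cons_neg (k v : List Char) (c : Char) (t : List Char)
    (h : ¬ k <+: c :: t) : pvScan1 k v (c :: t) = c :: pvScan1 k v t := by
  rw [pvScan1]
  simp only [List.isPrefixOf_iff_prefix]
  rw [if_neg h]

theorem pvScan1_self (k2 v u : List Char) :
    pvScan1 ('<' :: k2) v (('<' :: k2) ++ u) = v ++ pvScan1 ('<' :: k2) v u := by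
  rw [List.cons_append, pvScan1]
  have hpre : ('<' :: k2) <+: ('<' :: (k2 ++ u)) := ⟨u, by simp⟩
  simp only [List.isPrefixOf_iff_prefix]
  rw [if_pos hpre]
  simp

-- go of PySem.Chars.replace with enough fuel is pvScan1
theorem pvGo_eq_scan1 (k v : List Char) (hk : k ≠ []) :
    ∀ (fuel : Nat) (l acc : List Char), l.length ≤ fuel →
      PySem.Chars.replace.go k v fuel l acc = acc.reverse ++ pvScan1 k v l := by
  intro fuel
  induction fuel with
  | zero =>
    intro l acc hl
    have : l = [] := by
      cases l with
      | nil => rfl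
      | cons a b => simp at hl
    subst this
    simp [PySem.Chars.replace.go, pvScan1_nil]
  | succ n ih =>
    intro l acc hl
    cases l with
    | nil => simp [PySem.Chars.replace.go, pvScan1_nil]
    | cons c t =>
      rw [PySem.Chars.replace.go]
      by_cases h : k.isPrefixOf (c :: t)
      · rw [if_pos h]
        have hdrop : List.drop k.length (c :: t) = t.drop (k.length - 1) := by
          cases k with
          | nil => exact absurd rfl hk
          | cons a b => simp
        have hlen : (t.drop (k.length - 1)).length ≤ n := by
          simp only [List.length_drop]
          simp at hl
          omega
        rw [hdrop, ih _ _ hlen]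
        rw [pvScan1]
        simp only [List.isPrefixOf_iff_prefix] at h ⊢
        rw [if_pos h]
        simp
      · rw [if_neg h]
        have hlen : t.length ≤ n := by simp at hl; omega
        rw [ih _ _ hlen]
        rw [pvScan1]
        simp only [List.isPrefixOf_iff_prefix] at h ⊢
        rw [if_neg h]
        simp

theorem pvReplace_eq_scan1 (k v s : List Char) (hk : k ≠ []) :
    PySem.Chars.replace s k v = pvScan1 k v s := by
  rw [PySem.Chars.replace]
  have he : k.isEmpty = false := by simpa [List.isEmpty_iff] using hk
  rw [he]
  simpa using pvGo_eq_scan1 k v hk s.length s [] (le_refl _)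

-- two prefixes of the same list are comparable; incomparable keys never match a padded list
theorem pvNotPrefix_append (k a b : List Char) (h1 : ¬ k <+: a) (h2 : ¬ a <+: k) :
    ¬ k <+: a ++ b := by
  intro h
  rcases List.prefix_or_prefix_of_prefix h (List.prefix_append a b) with h' | h'
  · exact h1 h'
  · exact h2 h'

-- a key shaped '<'::… never matches inside a '<'-free stretch, so the scan copies it
theorem pvScan1_copy (k2 v b : List Char) :
    ∀ (a : List Char), '<' ∉ a →
      pvScan1 ('<' :: k2) v (a ++ b) = a ++ pvScan1 ('<' :: k2) v b := by
  intro a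
  induction a with
  | nil => simp
  | cons x a' ih =>
    intro hlt
    have hx : x ≠ '<' := fun h => hlt (h ▸ List.mem_cons_self ..)
    rw [List.cons_append, pvScan1_cons_neg]
    · rw [ih (fun h => hlt (List.mem_cons_of_mem _ h))]
      simp
    · intro h
      rcases List.cons_prefix_cons.mp h with ⟨h', _⟩
      exact hx h'.symm

-- hop: a whole block '<'::a2 (no further '<') that the key is incomparable with is copied
theorem pvScan1_hop (k2 v a2 b : List Char) (hlt : '<' ∉ a2)
    (h1 : ¬ ('<' :: k2) <+: ('<' :: a2)) (h2 : ¬ ('<' :: a2) <+: ('<' :: k2)) :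
    pvScan1 ('<' :: k2) v (('<' :: a2) ++ b) = ('<' :: a2) ++ pvScan1 ('<' :: k2) v b := by
  rw [List.cons_append, pvScan1_cons_neg _ _ _ _ (by
    have := pvNotPrefix_append ('<' :: k2) ('<' :: a2) b h1 h2
    simpa using this)]
  rw [pvScan1_copy k2 v b a2 hlt]
  simp

-- a '<'-free prefix of the scan output is already a prefix of the input
theorem pvScan1_reflect (k2 v2 : List Char) :
    ∀ (n : Nat) (t p : List Char), t.length ≤ n → '<' ∉ p →
      p <+: pvScan1 ('<' :: k2) ('<' :: v2) t → p <+: t := by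
  intro n
  induction n with
  | zero =>
    intro t p hl hp hpre
    have : t = [] := by cases t with
      | nil => rfl
      | cons a b => simp at hl
    subst this
    rw [pvScan1_nil] at hpre
    simpa using hpre
  | succ n ih =>
    intro t p hl hp hpre
    cases t with
    | nil =>
      rw [pvScan1_nil] at hpre
      simpa using hpre
    | cons c u =>
      by_cases h : ('<' :: k2) <+: c :: u
      · rw [pvScan1] at hpre
        simp only [List.isPrefixOf_iff_prefix] at hpre
        rw [if_pos h] at hpre
        cases p with
        | nil => exact List.nil_prefix
        | cons x p' =>
          rcases List.cons_prefix_cons.mp hpre with ⟨hx, _⟩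
          exact absurd (hx ▸ List.mem_cons_self ..) hp
      · rw [pvScan1_cons_neg _ _ _ _ h] at hpre
        cases p with
        | nil => exact List.nil_prefix
        | cons x p' =>
          rcases List.cons_prefix_cons.mp hpre with ⟨hx, hrest⟩
          refine List.cons_prefix_cons.mpr ⟨hx, ?_⟩
          exact ih u p' (by simp at hl; omega) (fun h' => hp (List.mem_cons_of_mem _ h')) hrest

theorem pvScan1_reflect_cons (k2 ki2 vi2 : List Char) (h2 : '<' ∉ k2) (c : Char) (t : List Char)
    (h : ¬ ('<' :: k2) <+: c :: t) :
    ¬ ('<' :: k2) <+: c :: pvScan1 ('<' :: ki2) ('<' :: vi2) t := by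
  intro hp
  rcases List.cons_prefix_cons.mp hp with ⟨hc, hrest⟩
  exact h (List.cons_prefix_cons.mpr ⟨hc,
    pvScan1_reflect ki2 vi2 t.length t _ (le_refl _) h2 hrest⟩)

theorem pvGood_tail {kv : List Char × List Char} {tbl : List (List Char × List Char)}
    (h : pvGood (kv :: tbl)) : pvGood tbl := by
  obtain ⟨h1, h2, h3⟩ := h
  exact ⟨fun x hx => h1 x (List.mem_cons_of_mem _ hx), (List.pairwise_cons.mp h2).2,
    fun a ha b hb => h3 a (List.mem_cons_of_mem _ ha) b (List.mem_cons_of_mem _ hb)⟩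

theorem pvChain_step (kv : List Char × List Char) (rest : List (List Char × List Char))
    (s : List Char) : pvChain (kv :: rest) s = pvChain rest (pvScan1 kv.1 kv.2 s) := rfl

theorem pvChain_nil : ∀ (tbl : List (List Char × List Char)), pvChain tbl [] = [] := by
  intro tbl
  induction tbl with
  | nil => rfl
  | cons kv rest ih => rw [pvChain_step, pvScan1_nil]; exact ih

-- the whole chain copies a block every key is incomparable with
theorem pvChain_hop : ∀ (tbl : List (List Char × List Char)) (a2 X : List Char),
    '<' ∉ a2 →
    (∀ kv ∈ tbl, kv.1.head? = some '<') →
    (∀ kv ∈ tbl, ¬ kv.1 <+: ('<' :: a2) ∧ ¬ ('<' :: a2) <+: kv.1) →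
    pvChain tbl (('<' :: a2) ++ X) = ('<' :: a2) ++ pvChain tbl X := by
  intro tbl
  induction tbl with
  | nil => intro a2 X _ _ _; rfl
  | cons kv rest ih =>
    intro a2 X hlt hshape hinc
    obtain ⟨k, v⟩ := kv
    have hh := hshape _ (List.mem_cons_self ..)
    obtain ⟨hi1, hi2⟩ := hinc _ (List.mem_cons_self ..)
    simp only at hh hi1 hi2
    rw [pvChain_step]
    simp only
    rw [pvShapeCons hh] at hi1 hi2 ⊢
    rw [pvScan1_hop _ _ _ _ hlt hi1 hi2]
    rw [← pvShapeCons hh]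
    exact ih a2 _ hlt (fun x hx => hshape x (List.mem_cons_of_mem _ hx))
      (fun x hx => hinc x (List.mem_cons_of_mem _ hx))

-- the chain on a matched key: only that key fires, everything else hops over it
theorem pvChain_match : ∀ (tbl : List (List Char × List Char)) (k v : List Char),
    pvGood tbl → (k, v) ∈ tbl → ∀ u : List Char,
    pvChain tbl (k ++ u) = v ++ pvChain tbl u := by
  intro tbl
  induction tbl with
  | nil => intro k v _ hmem; simp at hmem
  | cons kv0 rest ih =>
    intro k v hGood hmem u
    obtain ⟨k0, v0⟩ := kv0
    obtain ⟨hsh, hpw, hkv⟩ := hGood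
    rcases List.mem_cons.mp hmem with heq | hmem'
    · -- head entry matches
      obtain ⟨hek, hev⟩ := Prod.mk.injEq .. ▸ heq
      subst hek; subst hev
      obtain ⟨hk1, hk2, hv1, hv2⟩ := hsh _ (List.mem_cons_self ..)
      simp only at hk1 hk2 hv1 hv2
      rw [pvChain_step]
      simp only
      rw [pvShapeCons hk1, pvScan1_self]
      rw [pvShapeCons hv1]
      rw [pvChain_hop rest v.tail _ hv2
        (fun x hx => (hsh x (List.mem_cons_of_mem _ hx)).1)
        (fun x hx => by
          have := hkv x (List.mem_cons_of_mem _ hx) (k, v) (List.mem_cons_self ..)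
          rw [pvShapeCons hv1] at this
          exact this)]
      rw [← pvShapeCons hv1, ← pvShapeCons hk1, pvChain_step]
    · -- the match is deeper in the table; the head key hops over it
      obtain ⟨hk01, hk02, _, _⟩ := hsh _ (List.mem_cons_self ..)
      obtain ⟨hk1, hk2, _, _⟩ := hsh _ (List.mem_cons_of_mem _ hmem')
      simp only at hk01 hk02 hk1 hk2
      have hpair : ¬ k0 <+: k ∧ ¬ k <+: k0 := by
        have := (List.pairwise_cons.mp hpw).1 _ hmem'
        exact this
      rw [pvChain_step]
      simp only
      rw [pvShapeCons hk01, pvShapeCons hk1]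
      rw [pvScan1_hop _ _ _ _ hk2
        (by rw [← pvShapeCons hk01, ← pvShapeCons hk1]; exact hpair.1)
        (by rw [← pvShapeCons hk01, ← pvShapeCons hk1]; exact hpair.2)]
      rw [← pvShapeCons hk1, ← pvShapeCons hk01]
      exact ih k v (pvGood_tail ⟨hsh, hpw, hkv⟩) hmem' _

-- the chain copies a character position no key matches at
theorem pvChain_cons : ∀ (tbl : List (List Char × List Char)) (c : Char) (t : List Char),
    pvGood tbl → (∀ kv ∈ tbl, ¬ kv.1 <+: c :: t) →
    pvChain tbl (c :: t) = c :: pvChain tbl t := by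
  intro tbl
  induction tbl with
  | nil => intro c t _ _; rfl
  | cons kv0 rest ih =>
    intro c t hGood hno
    obtain ⟨k0, v0⟩ := kv0
    obtain ⟨hsh, hpw, hkv⟩ := hGood
    obtain ⟨hk01, hk02, hv01, hv02⟩ := hsh _ (List.mem_cons_self ..)
    simp only at hk01 hk02 hv01 hv02
    rw [pvChain_step]
    simp only
    rw [pvScan1_cons_neg _ _ _ _ (hno _ (List.mem_cons_self ..))]
    refine ih c _ (pvGood_tail ⟨hsh, hpw, hkv⟩) ?_
    intro kv hkv'
    obtain ⟨hk1, hk2, _, _⟩ := hsh _ (List.mem_cons_of_mem _ hkv')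
    rw [pvShapeCons hk1]
    rw [pvShapeCons hk01, pvShapeCons hv01]
    exact pvScan1_reflect_cons _ _ _ hk2 c t
      (by rw [← pvShapeCons hk1]; exact hno _ (List.mem_cons_of_mem _ hkv'))

-- main equivalence on char lists: eight sequential passes = one table-driven pass
theorem pvMain : ∀ (n : Nat) (s : List Char), s.length ≤ n →
    pvChain pvTableB s = pvScanB s := by
  intro n
  induction n with
  | zero =>
    intro s hl
    have : s = [] := by cases s with
      | nil => rfl
      | cons a b => simp at hl
    subst this
    rw [pvChain_nil, pvScanB]
  | succ n ih =>
    intro s hl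
    cases s with
    | nil => rw [pvChain_nil, pvScanB]
    | cons c t =>
      cases hfind : pvTableB.find? (fun kv => kv.1.isPrefixOf (c :: t)) with
      | some kv =>
        obtain ⟨k, v⟩ := kv
        have hmem : (k, v) ∈ pvTableB := List.mem_of_find?_eq_some hfind
        have hpre : k <+: c :: t := by
          have := List.find?_some hfind
          simpa [List.isPrefixOf_iff_prefix] using this
        obtain ⟨hk1, hk2, _, _⟩ := pvGood_tableB.1 _ hmem
        simp only at hk1 hk2
        obtain ⟨u, hu⟩ := hpre
        have hc : c :: t = k ++ u := hu.symm
        rw [pvScanB]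
        simp only [hfind]
        rw [hc, pvChain_match pvTableB k v pvGood_tableB hmem u]
        have hdrop : t.drop (k.length - 1) = u := by
          rw [pvShapeCons hk1] at hc
          simp only [List.cons_append, List.cons.injEq] at hc
          rw [hc.2, pvShapeCons hk1]
          simp
        rw [hdrop]
        have hklen : 1 ≤ k.length := by
          rw [pvShapeCons hk1]; simp
        have hul : u.length ≤ n := by
          have : (c :: t).length = k.length + u.length := by rw [hc]; simp
          simp at this hl
          omega
        rw [ih u hul]
      | none =>
        have hno : ∀ kv ∈ pvTableB, ¬ kv.1 <+: c :: t := by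
          intro kv hkv
          have := List.find?_eq_none.mp hfind kv hkv
          simpa [List.isPrefixOf_iff_prefix] using this
        rw [pvScanB]
        simp only [hfind]
        rw [pvChain_cons pvTableB c t pvGood_tableB hno]
        rw [ih t (by simp at hl; omega)]

-- bridge: the String-level foldl of A is the char-level chain over the same table
theorem pvFold_toList : ∀ (pairs : List (String × String)) (s : String),
    (pairs.foldl (fun h kv => PySem.Str.replace h kv.1 kv.2) s).toList =
      (pairs.map (fun kv => (kv.1.toList, kv.2.toList))).foldl
        (fun h kv => PySem.Chars.replace h kv.1 kv.2) s.toList := by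
  intro pairs
  induction pairs with
  | nil => intro s; rfl
  | cons kv rest ih =>
    intro s
    simp only [List.map_cons, List.foldl_cons]
    rw [ih]
    congr 1
    rw [PySem.Str.replace, String.toList_ofList]

theorem pvFoldReplace_eq_chain : ∀ (tbl : List (List Char × List Char)) (s : List Char),
    (∀ kv ∈ tbl, kv.1 ≠ []) →
    tbl.foldl (fun h kv => PySem.Chars.replace h kv.1 kv.2) s = pvChain tbl s := by
  intro tbl
  induction tbl with
  | nil => intro s _; rfl
  | cons kv rest ih =>
    intro s hne
    simp only [pvChain, List.foldl_cons]
    rw [pvReplace_eq_scan1 _ _ _ (hne _ (List.mem_cons_self ..))]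
    exact ih _ (fun x hx => hne x (List.mem_cons_of_mem _ hx))

theorem pvA_eq_chain (html : String) :
    (restyle_mistune_html_py html).toList = pvChain pvTableB html.toList := by
  rw [restyle_mistune_html_py, pvFold_toList]
  have htbl : pvPairsA.map (fun kv => (kv.1.toList, kv.2.toList)) = pvTableB := by rfl
  rw [htbl]
  refine pvFoldReplace_eq_chain pvTableB html.toList ?_
  intro kv hkv
  have := pvGood_tableB.1 _ hkv
  intro h
  rw [h] at this
  simp at this

-- ===== VERDICT (by name: the statement is the Claim_ definition above) =====
theorem restyle_mistune_html_py_spec : Claim_equal_restyle_mistune_html_py := by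
  intro html _
  unfold Spec_restyle_mistune_html_py restyle_mistune_html_py_alt
  have h := pvA_eq_chain html
  rw [pvMain html.toList.length html.toList (le_refl _)] at h
  rw [← h, String.ofList_toList]
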